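-- pv_equiv track=rewrite | github.com/InvictusMalum/Advent-Of-Code-2021 | day5.py | countOverlappingHorizOrVertOr45DegreeLines
-- ===== SOURCE A (Python) =====
-- def countOverlappingHorizOrVertOr45DegreeLines(lines):
--     total = 0
--     diagram = [[0 for i in range(1000)] for j in range(1000)]
--     for line in lines:
--         p1 = line[0]
--         p2 = line[1]
--
--         if p1[0] == p2[0] or p1[1] == p2[1]:
--             for x in range(min(p1[0],p2[0]), max(p1[0], p2[0])+1):
--                 for y in range(min(p1[1],p2[1]), max(p1[1], p2[1])+1):
--                     diagram[y][x] += 1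
--
--         elif p2[0]-p1[0] == p2[1]-p1[1]:
--             for add in range(0, max(p2[0]-p1[0], p1[0]-p2[0])+1):
--                 diagram[min(p1[1],p2[1])+add][min(p1[0],p2[0])+add] += 1
--
--         elif p2[0]-p1[0] == -(p2[1]-p1[1]):
--             for add in range(0, max(p2[0]-p1[0], p1[0]-p2[0])+1):
--                 diagram[max(p1[1],p2[1])-add][min(p1[0],p2[0])+add] += 1
--
--     for row in range(len(diagram)):
--         for col in range(len(diagram[0])):
--             if diagram[row][col] > 1:
--                 total += 1
--     return total
-- ===== SOURCE B (Python) =====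
-- def countOverlappingHorizOrVertOr45DegreeLines(lines):
--     # One sweep over the segments: 'seen' holds every point covered so far,
--     # 'overlaps' every point covered by at least two segments.
--     seen = set()
--     overlaps = set()
--     for (x1, y1), (x2, y2) in lines:
--         dx, dy = x2 - x1, y2 - y1
--         if dx == 0 or dy == 0 or abs(dx) == abs(dy):
--             sx = (dx > 0) - (dx < 0)
--             sy = (dy > 0) - (dy < 0)
--             pts = {(x1 + i * sx, y1 + i * sy) for i in range(max(abs(dx), abs(dy)) + 1)}
--             overlaps |= seen & pts
--             seen |= pts
--     return len(overlaps)
-- ===== Notes on version B (the rewrite author's own statement) =====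
-- stated objective: simpler
-- what changed: B drops A's 1000x1000 counter grid, its three per-orientation stamping branches and its final full-grid >1 scan: it sweeps the segments once with two plain sets (points seen so far / points seen again), adding each segment's points by one sign-step walk, and returns the size of the overlap set; Pre_ restricts to the puzzle's natural 0..999 grid coordinates, excluding accepted segments with negative coordinates where A's value comes from Python's negative-index wraparound on the fixed grid.
-- outside the precondition, e.g. on countOverlappingHorizOrVertOr45DegreeLines([((-3, 5), (-3, 5)), ((997, 5), (997, 5))]): A returns 1, B returns 0
import Mathlib
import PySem

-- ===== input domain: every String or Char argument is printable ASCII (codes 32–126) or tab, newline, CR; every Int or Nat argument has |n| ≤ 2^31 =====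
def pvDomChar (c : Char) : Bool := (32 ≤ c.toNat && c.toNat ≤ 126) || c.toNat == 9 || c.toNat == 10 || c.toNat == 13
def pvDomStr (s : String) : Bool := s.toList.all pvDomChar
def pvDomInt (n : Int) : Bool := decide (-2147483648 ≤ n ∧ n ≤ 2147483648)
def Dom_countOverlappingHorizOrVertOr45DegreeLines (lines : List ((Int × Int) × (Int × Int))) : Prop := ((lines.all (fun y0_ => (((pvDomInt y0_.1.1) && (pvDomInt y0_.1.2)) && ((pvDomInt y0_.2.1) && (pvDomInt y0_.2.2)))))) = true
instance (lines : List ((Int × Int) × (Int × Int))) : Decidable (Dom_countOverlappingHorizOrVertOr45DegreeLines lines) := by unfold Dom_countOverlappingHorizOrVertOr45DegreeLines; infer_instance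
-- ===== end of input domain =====

-- B replaces A's 1000×1000 counter grid, three stamping branches and final full-grid scan by one
-- sweep with two sets (points seen once / seen again) on the puzzle's 0..999 grid (objective:
-- simpler). Return value only; neither program mutates its argument.

-- ===== PORT A =====
-- Python lists are arrays, so the 1000×1000 grid is ported as Array (Array Int).
-- `diagram[y][x] += 1` with Python index semantics (negative index counts from the end;
-- out-of-range, where Python raises IndexError and Pre_ excludes, is a no-op here).
def pyBump (g : Array (Array Int)) (y x : Int) : Array (Array Int) :=
  g.modify (if y < 0 then y + g.size else y).toNat
    (fun row => row.modify (if x < 0 then x + row.size else x).toNat (· + 1))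

-- Python's `a[i]` on an array: negative index counts from the end; the default is
-- returned exactly where Python raises IndexError (excluded by Pre_).
def pyGetA {α : Type} (g : Array α) (i : Int) (d : α) : α :=
  (g[(if i < 0 then i + g.size else i).toNat]?).getD d

def countOverlappingHorizOrVertOr45DegreeLines (lines : List ((Int × Int) × (Int × Int))) : Int :=
  let g0 : Array (Array Int) :=
    ((PySem.List.pyRange 0 1000).map (fun _ =>
      ((PySem.List.pyRange 0 1000).map (fun _ => (0 : Int))).toArray)).toArray
  let g := lines.foldl (fun g line =>
    let p1 := line.1
    let p2 := line.2
    if p1.1 == p2.1 || p1.2 == p2.2 then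
      (PySem.List.pyRange (min p1.1 p2.1) (max p1.1 p2.1 + 1)).foldl (fun g x =>
        (PySem.List.pyRange (min p1.2 p2.2) (max p1.2 p2.2 + 1)).foldl (fun g y =>
          pyBump g y x) g) g
    else if p2.1 - p1.1 == p2.2 - p1.2 then
      (PySem.List.pyRange 0 (max (p2.1 - p1.1) (p1.1 - p2.1) + 1)).foldl (fun g add =>
        pyBump g (min p1.2 p2.2 + add) (min p1.1 p2.1 + add)) g
    else if p2.1 - p1.1 == -(p2.2 - p1.2) then
      (PySem.List.pyRange 0 (max (p2.1 - p1.1) (p1.1 - p2.1) + 1)).foldl (fun g add =>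
        pyBump g (max p1.2 p2.2 - add) (min p1.1 p2.1 + add)) g
    else g) g0
  (PySem.List.pyRange 0 (g.size : Int)).foldl (fun total row =>
    (PySem.List.pyRange 0 ((pyGetA g 0 #[]).size : Int)).foldl (fun total col =>
      if pyGetA (pyGetA g row #[]) col 0 > 1 then total + 1 else total)
      total) 0

-- ===== PORT B =====
-- Python's `(dx > 0) - (dx < 0)`
def pySgn (n : Int) : Int := (if 0 < n then 1 else 0) - (if n < 0 then 1 else 0)

def countOverlappingHorizOrVertOr45DegreeLines_alt (lines : List ((Int × Int) × (Int × Int))) : Int :=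
  let res := lines.foldl (fun st line =>
    let x1 := line.1.1
    let y1 := line.1.2
    let x2 := line.2.1
    let y2 := line.2.2
    let dx := x2 - x1
    let dy := y2 - y1
    if dx == 0 || dy == 0 || |dx| == |dy| then
      let sx := pySgn dx
      let sy := pySgn dy
      let pts : PySem.Set (Int × Int) :=
        PySem.Set.ofList ((PySem.List.pyRange 0 (max |dx| |dy| + 1)).map
          (fun i => (x1 + i * sx, y1 + i * sy)))
      (PySem.Set.union st.1 pts, PySem.Set.union st.2 (PySem.Set.inter st.1 pts))
    else st)
    ((PySem.Set.empty : PySem.Set (Int × Int)), (PySem.Set.empty : PySem.Set (Int × Int)))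
  PySem.Set.len res.2

-- ===== PRECONDITION & SPEC =====
-- A raises IndexError when a segment its branches accept (horizontal, vertical, 45°, or a single
-- point) leaves [-1000, 999]; Pre_ further restricts those segments to the puzzle's natural
-- 0..999 grid, excluding accepted segments with a negative coordinate, on which A still returns
-- but its value is an artefact of Python's negative-index wraparound on the fixed 1000-cell grid.
def Pre_countOverlappingHorizOrVertOr45DegreeLines (lines : List ((Int × Int) × (Int × Int))) : Prop :=
  ∀ l ∈ lines,
    (l.2.1 - l.1.1 = 0 ∨ l.2.2 - l.1.2 = 0 ∨ l.2.1 - l.1.1 = l.2.2 - l.1.2 ∨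
      l.2.1 - l.1.1 = -(l.2.2 - l.1.2)) →
    (0 ≤ l.1.1 ∧ l.1.1 ≤ 999) ∧ (0 ≤ l.1.2 ∧ l.1.2 ≤ 999) ∧
    (0 ≤ l.2.1 ∧ l.2.1 ≤ 999) ∧ (0 ≤ l.2.2 ∧ l.2.2 ≤ 999)
instance (lines : List ((Int × Int) × (Int × Int))) : Decidable (Pre_countOverlappingHorizOrVertOr45DegreeLines lines) := by
  unfold Pre_countOverlappingHorizOrVertOr45DegreeLines; infer_instance

def pvWitness_countOverlappingHorizOrVertOr45DegreeLines : (List ((Int × Int) × (Int × Int))) :=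
  [((0, 0), (2, 2)), ((0, 2), (2, 0)), ((0, 1), (2, 1))]

def Spec_countOverlappingHorizOrVertOr45DegreeLines (lines : List ((Int × Int) × (Int × Int))) (out : Int) : Prop := out = countOverlappingHorizOrVertOr45DegreeLines_alt lines
instance (lines : List ((Int × Int) × (Int × Int))) (out : Int) : Decidable (Spec_countOverlappingHorizOrVertOr45DegreeLines lines out) := by unfold Spec_countOverlappingHorizOrVertOr45DegreeLines; infer_instance

-- ===== CLAIM (what is proved, stated in full; the proofs are below) =====
def Claim_equal_countOverlappingHorizOrVertOr45DegreeLines : Prop := ∀ (lines : List ((Int × Int) × (Int × Int))), Dom_countOverlappingHorizOrVertOr45DegreeLines lines → Pre_countOverlappingHorizOrVertOr45DegreeLines lines → Spec_countOverlappingHorizOrVertOr45DegreeLines lines (countOverlappingHorizOrVertOr45DegreeLines lines)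

-- ===== LEMMAS AND PROOFS =====

-- pyRange in closed form
lemma pyRange_nil (a b : Int) (h : b ≤ a) : PySem.List.pyRange a b = [] := by
  simp [PySem.List.pyRange]; omega

lemma pyRange_eq_map_range (a : Int) (n : Nat) :
    PySem.List.pyRange (a) (a + n) = (List.range n).map (fun i : Nat => a + (i : Int)) := by
  induction n with
  | zero => simp [pyRange_nil a a le_rfl]
  | succ n ih =>
    have : (a + (n + 1 : Nat)) = (a + n) + 1 := by push_cast; ring
    rw [this, PySem.List.pyRange_one_succ_right (by omega), ih, List.range_succ]
    simp

lemma pyRange_zero_eq (b : Int) (m : Nat) (h : b = m) :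
    PySem.List.pyRange 0 b = (List.range m).map (fun i : Nat => (i : Int)) := by
  subst h; exact PySem.List.pyRange_zero_natCast m

lemma pyRange_eq (a b : Int) (m : Nat) (h : b = a + (m : Int)) :
    PySem.List.pyRange a b = (List.range m).map (fun i : Nat => a + (i : Int)) := by
  subst h; exact pyRange_eq_map_range a m

lemma reverse_range (n : Nat) : (List.range n).reverse = (List.range n).map (fun i => n - 1 - i) := by
  rw [List.range_eq_range', List.reverse_range']
  simp [← List.range_eq_range']

lemma perm_map_range_rev {α : Type} (m : Nat) (F G : Nat → α)
    (h : ∀ i < m, F i = G (m - 1 - i)) :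
    ((List.range m).map F).Perm ((List.range m).map G) := by
  have he : (List.range m).map F = ((List.range m).map G).reverse := by
    rw [← List.map_reverse, reverse_range, List.map_map]
    apply List.map_congr_left
    intro i hi
    exact h i (List.mem_range.mp hi)
  rw [he]
  exact List.reverse_perm _

-- The cells A's branches stamp for one segment, as (x, y) pairs in stamping order.
def stampsOf (l : (Int × Int) × (Int × Int)) : List (Int × Int) :=
  if l.1.1 == l.2.1 || l.1.2 == l.2.2 then
    (PySem.List.pyRange (min l.1.1 l.2.1) (max l.1.1 l.2.1 + 1)).flatMap (fun x =>
      (PySem.List.pyRange (min l.1.2 l.2.2) (max l.1.2 l.2.2 + 1)).map (fun y => (x, y)))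
  else if l.2.1 - l.1.1 == l.2.2 - l.1.2 then
    (PySem.List.pyRange 0 (max (l.2.1 - l.1.1) (l.1.1 - l.2.1) + 1)).map (fun add =>
      (min l.1.1 l.2.1 + add, min l.1.2 l.2.2 + add))
  else if l.2.1 - l.1.1 == -(l.2.2 - l.1.2) then
    (PySem.List.pyRange 0 (max (l.2.1 - l.1.1) (l.1.1 - l.2.1) + 1)).map (fun add =>
      (min l.1.1 l.2.1 + add, max l.1.2 l.2.2 - add))
  else []

-- The points B's sign-step walk visits for one segment.
def keysOf (l : (Int × Int) × (Int × Int)) : List (Int × Int) :=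
  if l.2.1 - l.1.1 == 0 || l.2.2 - l.1.2 == 0 || |l.2.1 - l.1.1| == |l.2.2 - l.1.2| then
    (PySem.List.pyRange 0 (max |l.2.1 - l.1.1| |l.2.2 - l.1.2| + 1)).map (fun i =>
      (l.1.1 + i * pySgn (l.2.1 - l.1.1), l.1.2 + i * pySgn (l.2.2 - l.1.2)))
  else []

-- the grid cell a point lands in: diagram[y][x] is cell (x % 1000, y % 1000)
def wrapPt (k : Int × Int) : Int × Int := (PySem.Int.mod k.1 1000, PySem.Int.mod k.2 1000)

lemma mod1000_lb (a : Int) : 0 ≤ PySem.Int.mod a 1000 := PySem.Int.mod_nonneg a (by norm_num)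
lemma mod1000_ub (a : Int) : PySem.Int.mod a 1000 < 1000 := PySem.Int.mod_lt a (by norm_num)

lemma mod1000_eq (a : Int) (h1 : -1000 ≤ a) (h2 : a ≤ 999) :
    PySem.Int.mod a 1000 = if a < 0 then a + 1000 else a := by
  have hm := PySem.Int.floordiv_mul_add_mod a 1000
  have h3 := mod1000_lb a
  have h4 := mod1000_ub a
  split_ifs <;> omega

def cell (g : Array (Array Int)) (y x : Nat) : Int := ((g[y]?.getD #[])[x]?).getD 0

def Shape (g : Array (Array Int)) : Prop := g.size = 1000 ∧ ∀ r ∈ g, r.size = 1000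

-- A's per-line loop body is the bump-fold over stampsOf
lemma A_line_eq (g : Array (Array Int)) (l : (Int × Int) × (Int × Int)) :
    (if l.1.1 == l.2.1 || l.1.2 == l.2.2 then
       (PySem.List.pyRange (min l.1.1 l.2.1) (max l.1.1 l.2.1 + 1)).foldl (fun g x =>
         (PySem.List.pyRange (min l.1.2 l.2.2) (max l.1.2 l.2.2 + 1)).foldl (fun g y =>
           pyBump g y x) g) g
     else if l.2.1 - l.1.1 == l.2.2 - l.1.2 then
       (PySem.List.pyRange 0 (max (l.2.1 - l.1.1) (l.1.1 - l.2.1) + 1)).foldl (fun g add =>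
         pyBump g (min l.1.2 l.2.2 + add) (min l.1.1 l.2.1 + add)) g
     else if l.2.1 - l.1.1 == -(l.2.2 - l.1.2) then
       (PySem.List.pyRange 0 (max (l.2.1 - l.1.1) (l.1.1 - l.2.1) + 1)).foldl (fun g add =>
         pyBump g (max l.1.2 l.2.2 - add) (min l.1.1 l.2.1 + add)) g
     else g)
    = (stampsOf l).foldl (fun g k => pyBump g k.2 k.1) g := by
  unfold stampsOf
  split_ifs <;> simp [List.foldl_flatMap, List.foldl_map]

lemma stampsOf_perm (l : (Int × Int) × (Int × Int)) :
    (stampsOf l).Perm (keysOf l) := by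
  obtain ⟨⟨x1, y1⟩, ⟨x2, y2⟩⟩ := l
  unfold stampsOf keysOf
  dsimp only
  rcases lt_trichotomy x1 x2 with hx | hx | hx <;> rcases lt_trichotomy y1 y2 with hy | hy | hy
  -- x1<x2, y1<y2 : diagonal iff dx = dy
  · rw [show |x2 - x1| = x2 - x1 from abs_of_pos (by omega),
        show |y2 - y1| = y2 - y1 from abs_of_pos (by omega),
        if_neg (by simp; omega)]
    by_cases hd : x2 - x1 = y2 - y1
    · rw [if_pos (by simp; omega), if_pos (by simp; omega),
          pyRange_zero_eq _ ((x2 - x1).toNat + 1) (by omega),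
          pyRange_zero_eq _ ((x2 - x1).toNat + 1) (by omega),
          List.map_map, List.map_map]
      have hs1 : pySgn (x2 - x1) = 1 := by unfold pySgn; split_ifs <;> omega
      have hs2 : pySgn (y2 - y1) = 1 := by unfold pySgn; split_ifs <;> omega
      refine List.Perm.of_eq (List.map_congr_left ?_)
      intro i hi
      rw [Function.comp_apply, Function.comp_apply, hs1, hs2]
      simp only [Prod.mk.injEq, mul_one]
      constructor <;> omega
    · rw [if_neg (by simp; omega), if_neg (by simp; omega), if_neg (by simp; omega)]
  -- x1<x2, y1=y2 : horizontal, same order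
  · subst hy
    rw [pyRange_eq (min y1 y1) (max y1 y1 + 1) 1 (by omega)]
    simp only [List.range_one, List.map_cons, List.map_nil]
    rw [if_pos (by simp), ← List.map_eq_flatMap,
        pyRange_eq (min x1 x2) _ ((x2 - x1).toNat + 1) (by omega), List.map_map,
        if_pos (by simp),
        pyRange_zero_eq _ ((x2 - x1).toNat + 1)
          (by rw [show |x2 - x1| = x2 - x1 from abs_of_pos (by omega), show |y1 - y1| = 0 by simp]; omega),
        List.map_map]
    have hs1 : pySgn (x2 - x1) = 1 := by unfold pySgn; split_ifs <;> omega
    have hs2 : pySgn (y1 - y1) = 0 := by unfold pySgn; split_ifs <;> omega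
    refine List.Perm.of_eq (List.map_congr_left ?_)
    intro i hi
    rw [Function.comp_apply, Function.comp_apply, hs1, hs2]
    simp only [Prod.mk.injEq, mul_one, mul_zero]
    constructor <;> omega
  -- x1<x2, y2<y1 : anti-diagonal iff dx = -dy, same order
  · rw [show |x2 - x1| = x2 - x1 from abs_of_pos (by omega),
        show |y2 - y1| = -(y2 - y1) from abs_of_neg (by omega),
        if_neg (by simp; omega)]
    by_cases hd : x2 - x1 = -(y2 - y1)
    · rw [if_neg (by simp; omega), if_pos (by simp; omega), if_pos (by simp; omega),
          pyRange_zero_eq _ ((x2 - x1).toNat + 1) (by omega),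
          pyRange_zero_eq _ ((x2 - x1).toNat + 1) (by omega),
          List.map_map, List.map_map]
      have hs1 : pySgn (x2 - x1) = 1 := by unfold pySgn; split_ifs <;> omega
      have hs2 : pySgn (y2 - y1) = -1 := by unfold pySgn; split_ifs <;> omega
      refine List.Perm.of_eq (List.map_congr_left ?_)
      intro i hi
      rw [Function.comp_apply, Function.comp_apply, hs1, hs2]
      simp only [Prod.mk.injEq, mul_one, mul_neg_one]
      constructor <;> omega
    · rw [if_neg (by simp; omega), if_neg (by simp; omega), if_neg (by simp; omega)]
  -- x1=x2, y1<y2 : vertical, same order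
  · subst hx
    rw [pyRange_eq (min x1 x1) (max x1 x1 + 1) 1 (by omega)]
    simp only [List.range_one, List.map_cons, List.map_nil, List.flatMap_cons, List.flatMap_nil,
      List.append_nil]
    rw [if_pos (by simp),
        pyRange_eq (min y1 y2) _ ((y2 - y1).toNat + 1) (by omega), List.map_map,
        if_pos (by simp),
        pyRange_zero_eq _ ((y2 - y1).toNat + 1)
          (by rw [show |y2 - y1| = y2 - y1 from abs_of_pos (by omega), show |x1 - x1| = 0 by simp]; omega),
        List.map_map]
    have hs1 : pySgn (x1 - x1) = 0 := by unfold pySgn; split_ifs <;> omega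
    have hs2 : pySgn (y2 - y1) = 1 := by unfold pySgn; split_ifs <;> omega
    refine List.Perm.of_eq (List.map_congr_left ?_)
    intro i hi
    rw [Function.comp_apply, Function.comp_apply, hs1, hs2]
    simp only [Prod.mk.injEq, mul_one, mul_zero]
    constructor <;> omega
  -- x1=x2, y1=y2 : single point
  · subst hx; subst hy
    rw [pyRange_eq (min x1 x1) (max x1 x1 + 1) 1 (by omega),
        pyRange_eq (min y1 y1) (max y1 y1 + 1) 1 (by omega)]
    simp only [List.range_one, List.map_cons, List.map_nil, List.flatMap_cons, List.flatMap_nil,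
      List.append_nil]
    rw [if_pos (by simp), if_pos (by simp),
        pyRange_zero_eq _ 1 (by simp),
        List.map_map]
    simp only [List.range_one, List.map_cons, List.map_nil]
    have hs1 : pySgn (x1 - x1) = 0 := by unfold pySgn; split_ifs <;> omega
    have hs2 : pySgn (y1 - y1) = 0 := by unfold pySgn; split_ifs <;> omega
    refine List.Perm.of_eq ?_
    rw [Function.comp_apply, hs1, hs2]
    norm_num
  -- x1=x2, y2<y1 : vertical, reversed
  · subst hx
    rw [pyRange_eq (min x1 x1) (max x1 x1 + 1) 1 (by omega)]
    simp only [List.range_one, List.map_cons, List.map_nil, List.flatMap_cons, List.flatMap_nil,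
      List.append_nil]
    rw [if_pos (by simp),
        pyRange_eq (min y1 y2) _ ((y1 - y2).toNat + 1) (by omega), List.map_map,
        if_pos (by simp),
        pyRange_zero_eq _ ((y1 - y2).toNat + 1)
          (by rw [show |y2 - y1| = -(y2 - y1) from abs_of_neg (by omega), show |x1 - x1| = 0 by simp]; omega),
        List.map_map]
    have hs1 : pySgn (x1 - x1) = 0 := by unfold pySgn; split_ifs <;> omega
    have hs2 : pySgn (y2 - y1) = -1 := by unfold pySgn; split_ifs <;> omega
    refine perm_map_range_rev _ _ _ ?_
    intro i hi
    rw [Function.comp_apply, Function.comp_apply, hs1, hs2]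
    simp only [Prod.mk.injEq, mul_zero, mul_neg_one]
    constructor <;> omega
  -- x2<x1, y1<y2 : anti-diagonal iff dx = -dy, reversed
  · rw [show |x2 - x1| = -(x2 - x1) from abs_of_neg (by omega),
        show |y2 - y1| = y2 - y1 from abs_of_pos (by omega),
        if_neg (by simp; omega)]
    by_cases hd : x2 - x1 = -(y2 - y1)
    · rw [if_neg (by simp; omega), if_pos (by simp; omega), if_pos (by simp; omega),
          pyRange_zero_eq _ ((x1 - x2).toNat + 1) (by omega),
          pyRange_zero_eq _ ((x1 - x2).toNat + 1) (by omega),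
          List.map_map, List.map_map]
      have hs1 : pySgn (x2 - x1) = -1 := by unfold pySgn; split_ifs <;> omega
      have hs2 : pySgn (y2 - y1) = 1 := by unfold pySgn; split_ifs <;> omega
      refine perm_map_range_rev _ _ _ ?_
      intro i hi
      rw [Function.comp_apply, Function.comp_apply, hs1, hs2]
      simp only [Prod.mk.injEq, mul_one, mul_neg_one]
      constructor <;> omega
    · rw [if_neg (by simp; omega), if_neg (by simp; omega), if_neg (by simp; omega)]
  -- x2<x1, y1=y2 : horizontal, reversed
  · subst hy
    rw [pyRange_eq (min y1 y1) (max y1 y1 + 1) 1 (by omega)]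
    simp only [List.range_one, List.map_cons, List.map_nil]
    rw [if_pos (by simp), ← List.map_eq_flatMap,
        pyRange_eq (min x1 x2) _ ((x1 - x2).toNat + 1) (by omega), List.map_map,
        if_pos (by simp),
        pyRange_zero_eq _ ((x1 - x2).toNat + 1)
          (by rw [show |x2 - x1| = -(x2 - x1) from abs_of_neg (by omega), show |y1 - y1| = 0 by simp]; omega),
        List.map_map]
    have hs1 : pySgn (x2 - x1) = -1 := by unfold pySgn; split_ifs <;> omega
    have hs2 : pySgn (y1 - y1) = 0 := by unfold pySgn; split_ifs <;> omega
    refine perm_map_range_rev _ _ _ ?_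
    intro i hi
    rw [Function.comp_apply, Function.comp_apply, hs1, hs2]
    simp only [Prod.mk.injEq, mul_zero, mul_neg_one]
    constructor <;> omega
  -- x2<x1, y2<y1 : diagonal iff dx = dy, reversed
  · rw [show |x2 - x1| = -(x2 - x1) from abs_of_neg (by omega),
        show |y2 - y1| = -(y2 - y1) from abs_of_neg (by omega),
        if_neg (by simp; omega)]
    by_cases hd : x2 - x1 = y2 - y1
    · rw [if_pos (by simp; omega), if_pos (by simp; omega),
          pyRange_zero_eq _ ((x1 - x2).toNat + 1) (by omega),
          pyRange_zero_eq _ ((x1 - x2).toNat + 1) (by omega),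
          List.map_map, List.map_map]
      have hs1 : pySgn (x2 - x1) = -1 := by unfold pySgn; split_ifs <;> omega
      have hs2 : pySgn (y2 - y1) = -1 := by unfold pySgn; split_ifs <;> omega
      refine perm_map_range_rev _ _ _ ?_
      intro i hi
      rw [Function.comp_apply, Function.comp_apply, hs1, hs2]
      simp only [Prod.mk.injEq, mul_neg_one]
      constructor <;> omega
    · rw [if_neg (by simp; omega), if_neg (by simp; omega), if_neg (by simp; omega)]

lemma stampsOf_bounds (l : (Int × Int) × (Int × Int))
    (hl : (l.2.1 - l.1.1 = 0 ∨ l.2.2 - l.1.2 = 0 ∨ l.2.1 - l.1.1 = l.2.2 - l.1.2 ∨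
        l.2.1 - l.1.1 = -(l.2.2 - l.1.2)) →
      (0 ≤ l.1.1 ∧ l.1.1 ≤ 999) ∧ (0 ≤ l.1.2 ∧ l.1.2 ≤ 999) ∧
      (0 ≤ l.2.1 ∧ l.2.1 ≤ 999) ∧ (0 ≤ l.2.2 ∧ l.2.2 ≤ 999))
    (k : Int × Int) (hk : k ∈ stampsOf l) :
    0 ≤ k.1 ∧ k.1 ≤ 999 ∧ 0 ≤ k.2 ∧ k.2 ≤ 999 := by
  unfold stampsOf at hk
  split_ifs at hk with c1 c2 c3
  · have hacc : l.1.1 = l.2.1 ∨ l.1.2 = l.2.2 := by simpa using c1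
    obtain ⟨⟨h1, h2⟩, ⟨h3, h4⟩, ⟨h5, h6⟩, ⟨h7, h8⟩⟩ := hl (by omega)
    simp only [List.mem_flatMap, List.mem_map, PySem.List.mem_pyRange_one] at hk
    obtain ⟨x, hx, y, hy, rfl⟩ := hk
    dsimp only
    omega
  · have hc2 : l.2.1 - l.1.1 = l.2.2 - l.1.2 := by simpa using c2
    obtain ⟨⟨h1, h2⟩, ⟨h3, h4⟩, ⟨h5, h6⟩, ⟨h7, h8⟩⟩ := hl (by omega)
    simp only [List.mem_map, PySem.List.mem_pyRange_one] at hk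
    obtain ⟨a, ha, rfl⟩ := hk
    dsimp only
    omega
  · have hc3 : l.2.1 - l.1.1 = -(l.2.2 - l.1.2) := by simpa using c3
    obtain ⟨⟨h1, h2⟩, ⟨h3, h4⟩, ⟨h5, h6⟩, ⟨h7, h8⟩⟩ := hl (by omega)
    simp only [List.mem_map, PySem.List.mem_pyRange_one] at hk
    obtain ⟨a, ha, rfl⟩ := hk
    dsimp only
    omega
  · simp at hk

-- on the 0..999 grid the wrap map is the identity
lemma map_wrapPt_eq (S : List (Int × Int))
    (hS : ∀ k ∈ S, 0 ≤ k.1 ∧ k.1 ≤ 999 ∧ 0 ≤ k.2 ∧ k.2 ≤ 999) :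
    S.map wrapPt = S := by
  rw [show S.map wrapPt = S.map id from List.map_congr_left ?_, List.map_id]
  intro k hk
  obtain ⟨h1, h2, h3, h4⟩ := hS k hk
  unfold wrapPt
  rw [mod1000_eq k.1 (by omega) h2, mod1000_eq k.2 (by omega) h4,
    if_neg (by omega), if_neg (by omega)]
  rfl

lemma shape_bump (g : Array (Array Int)) (y x : Int) (h : Shape g) : Shape (pyBump g y x) := by
  obtain ⟨hlen, hrows⟩ := h
  refine ⟨by simp [pyBump, hlen], ?_⟩
  intro r hr
  rw [Array.mem_iff_getElem?] at hr
  obtain ⟨j, hj⟩ := hr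
  unfold pyBump at hj
  rw [Array.getElem?_modify] at hj
  cases hg : g[j]? with
  | none =>
    rw [hg] at hj
    by_cases hc : (if y < 0 then y + (g.size : Int) else y).toNat = j
    · rw [if_pos hc] at hj; simp at hj
    · rw [if_neg hc] at hj; simp at hj
  | some row =>
    have hrow : row.size = 1000 := by
      apply hrows
      rw [Array.mem_iff_getElem?]
      exact ⟨j, hg⟩
    rw [hg] at hj
    by_cases hc : (if y < 0 then y + (g.size : Int) else y).toNat = j
    · rw [if_pos hc, Option.map_some, Option.some.injEq] at hj
      rw [← hj]
      simp [hrow]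
    · rw [if_neg hc, Option.some.injEq] at hj
      rw [← hj]; exact hrow

lemma cell_bump (g : Array (Array Int)) (y x : Int) (h : Shape g)
    (hy1 : -1000 ≤ y) (hy2 : y ≤ 999) (hx1 : -1000 ≤ x) (hx2 : x ≤ 999)
    (y' x' : Nat) (hy' : y' < 1000) (hx' : x' < 1000) :
    cell (pyBump g y x) y' x'
      = cell g y' x'
        + (if PySem.Int.mod y 1000 = (y' : Int) ∧ PySem.Int.mod x 1000 = (x' : Int) then 1 else 0) := by
  obtain ⟨hlen, hrows⟩ := h
  have hwy := mod1000_eq y hy1 hy2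
  have hwyl := mod1000_lb y
  have hwxl := mod1000_lb x
  unfold pyBump cell
  have hyidx : (if y < 0 then y + (g.size : Int) else y) = PySem.Int.mod y 1000 := by
    rw [hlen, hwy]
    split_ifs <;> push_cast <;> ring
  rw [hyidx]
  have hy'lt : y' < g.size := by omega
  have hrow : g[y']? = some g[y'] := by simp [hy'lt]
  simp only [Array.getElem?_modify, hrow]
  by_cases hyy : (PySem.Int.mod y 1000).toNat = y'
  · have hyI : PySem.Int.mod y 1000 = (y' : Int) := by omega
    have hrl : (g[y']).size = 1000 := hrows _ (Array.getElem_mem hy'lt)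
    have hwx := mod1000_eq x hx1 hx2
    have hxidx : (if x < 0 then x + ((g[y']).size : Int) else x) = PySem.Int.mod x 1000 := by
      rw [hrl, hwx]
      split_ifs <;> push_cast <;> ring
    simp only [hyy, if_true, Option.map_some, Option.getD_some, hxidx]
    have hx'lt : x' < (g[y']).size := by omega
    have hrx : (g[y'])[x']? = some (g[y'])[x'] := by simp [hx'lt]
    by_cases hxx : (PySem.Int.mod x 1000).toNat = x'
    · have hxI : PySem.Int.mod x 1000 = (x' : Int) := by omega
      rw [hxx, Array.getElem?_modify, if_pos rfl, hrx, if_pos ⟨hyI, hxI⟩]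
      simp
    · have hxI : ¬ (PySem.Int.mod x 1000 = (x' : Int)) := by omega
      rw [Array.getElem?_modify, if_neg hxx, hrx, if_neg (fun hcon => hxI hcon.2)]
      simp
  · have hyI : ¬ (PySem.Int.mod y 1000 = (y' : Int)) := by omega
    rw [if_neg hyy, if_neg (fun hcon => hyI hcon.1)]
    simp

lemma foldl_bump_shape (S : List (Int × Int)) (g : Array (Array Int)) (h : Shape g) :
    Shape (S.foldl (fun g k => pyBump g k.2 k.1) g) := by
  induction S generalizing g with
  | nil => exact h
  | cons k S ih => exact ih _ (shape_bump _ _ _ h)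

lemma foldl_bump_cell (S : List (Int × Int)) (g : Array (Array Int)) (h : Shape g)
    (hS : ∀ k ∈ S, -1000 ≤ k.1 ∧ k.1 ≤ 999 ∧ -1000 ≤ k.2 ∧ k.2 ≤ 999)
    (x' y' : Nat) (hx' : x' < 1000) (hy' : y' < 1000) :
    cell (S.foldl (fun g k => pyBump g k.2 k.1) g) y' x'
      = cell g y' x' + ((S.map wrapPt).count ((x' : Int), (y' : Int)) : Int) := by
  induction S generalizing g with
  | nil => simp
  | cons k S ih =>
    obtain ⟨hk1, hk2, hk3, hk4⟩ := hS k List.mem_cons_self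
    rw [List.foldl_cons, ih (pyBump g k.2 k.1) (shape_bump g k.2 k.1 h)
      (fun k hk => hS k (List.mem_cons_of_mem _ hk)),
      cell_bump g k.2 k.1 h hk3 hk4 hk1 hk2 y' x' hy' hx', List.map_cons]
    by_cases hkk : PySem.Int.mod k.2 1000 = (y' : Int) ∧ PySem.Int.mod k.1 1000 = (x' : Int)
    · have hwk : wrapPt k = ((x' : Int), (y' : Int)) := by
        unfold wrapPt; rw [hkk.1, hkk.2]
      rw [if_pos hkk, hwk, List.count_cons_self]
      push_cast; ring
    · have hwk : wrapPt k ≠ ((x' : Int), (y' : Int)) := by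
        unfold wrapPt
        intro hcon
        rw [Prod.mk.injEq] at hcon
        exact hkk ⟨hcon.2, hcon.1⟩
      rw [if_neg hkk, List.count_cons_of_ne hwk]
      ring

lemma shape_g0 : Shape (((PySem.List.pyRange 0 1000).map (fun _ =>
    ((PySem.List.pyRange 0 1000).map (fun _ => (0 : Int))).toArray)).toArray) := by
  have h : PySem.List.pyRange 0 1000 = (List.range 1000).map (fun i : Nat => (i : Int)) := by
    have := PySem.List.pyRange_zero_natCast 1000
    norm_num at this ⊢
    exact this
  constructor
  · simp [h]
  · intro r hr
    rw [List.mem_toArray] at hr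
    obtain ⟨_, _, rfl⟩ := List.mem_map.mp hr
    simp [h]

lemma cell_g0 (y x : Nat) :
    cell (((PySem.List.pyRange 0 1000).map (fun _ =>
      ((PySem.List.pyRange 0 1000).map (fun _ => (0 : Int))).toArray)).toArray) y x = 0 := by
  unfold cell
  cases h : (PySem.List.pyRange 0 1000)[y]? with
  | none =>
    simp only [List.getElem?_toArray, List.getElem?_map, h, Option.map_none, Option.getD_none]
    simp
  | some v =>
    simp only [List.getElem?_toArray, List.getElem?_map, h, Option.map_some, Option.getD_some]
    cases (PySem.List.pyRange 0 1000)[x]? <;> simp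

lemma foldl_eq_flatMap_foldl {α β γ : Type} (body : γ → α → γ) (f : α → List β) (step : γ → β → γ)
    (h : ∀ g l, body g l = (f l).foldl step g) :
    ∀ (lines : List α) (g : γ), lines.foldl body g = (lines.flatMap f).foldl step g := by
  intro lines
  induction lines with
  | nil => intro g; rfl
  | cons l t ih => intro g; rw [List.foldl_cons, List.flatMap_cons, List.foldl_append, h, ih]

lemma count_flatMap_congr {α β : Type} [BEq β] (l : List α) (f g : α → List β)
    (h : ∀ a ∈ l, ∀ k, (f a).count k = (g a).count k) (k : β) :
    (l.flatMap f).count k = (l.flatMap g).count k := by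
  induction l with
  | nil => rfl
  | cons a t ih =>
    simp only [List.flatMap_cons, List.count_append]
    rw [h a List.mem_cons_self, ih (fun a ha => h a (List.mem_cons_of_mem _ ha))]

lemma sum_map_natCast {α : Type} (l : List α) (f : α → Nat) :
    (l.map (fun r => ((f r : Nat) : Int))).sum = (((l.map f).sum : Nat) : Int) := by
  induction l with
  | nil => rfl
  | cons a t ih => simp [ih]

lemma final_count (P : List (Int × Int))
    (hP : ∀ k ∈ P, 0 ≤ k.1 ∧ k.1 ≤ 999 ∧ 0 ≤ k.2 ∧ k.2 ≤ 999) :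
    ((List.range 1000).map (fun r : Nat =>
        ((List.range 1000).countP (fun c : Nat => decide (1 < P.count ((c : Int), (r : Int))))))).sum
      = (PySem.Set.ofList P).countP (fun kk => decide (1 < P.count kk)) := by
  have hG :
      ((List.range 1000).flatMap (fun r : Nat => (List.range 1000).map (fun c : Nat => ((c : Int), (r : Int))))).countP
          (fun kk => decide (1 < P.count kk))
        = ((List.range 1000).map (fun r : Nat =>
            ((List.range 1000).countP (fun c : Nat => decide (1 < P.count ((c : Int), (r : Int))))))).sum := by
    have hcf : ∀ (l : List Nat) (f : Nat → List (Int × Int)) (p : (Int × Int) → Bool),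
        (l.flatMap f).countP p = (l.map (fun a => (f a).countP p)).sum := by
      intro l f p
      induction l with
      | nil => rfl
      | cons a t ih => simp [List.flatMap_cons, List.countP_append, ih]
    rw [hcf]
    simp only [List.countP_map]
    rfl
  rw [← hG]
  have hGnodup : ((List.range 1000).flatMap (fun r : Nat => (List.range 1000).map (fun c : Nat => ((c : Int), (r : Int))))).Nodup := by
    rw [List.nodup_flatMap]
    constructor
    · intro r _
      exact (List.nodup_range).map (fun a b h => by simpa using h)
    · have := List.pairwise_lt_range (n := 1000)
      apply this.imp
      intro a b hab kk hka hkb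
      simp only [List.mem_map] at hka hkb
      obtain ⟨c1, _, rfl⟩ := hka
      obtain ⟨c2, _, h2⟩ := hkb
      have : (a : Int) = (b : Int) := by
        have := congrArg Prod.snd h2
        simpa using this.symm
      omega
  have hSnodup := PySem.Set.nodup_ofList P
  rw [List.countP_eq_length_filter, List.countP_eq_length_filter]
  apply List.Perm.length_eq
  apply (List.perm_ext_iff_of_nodup (hGnodup.filter _) (hSnodup.filter _)).mpr
  intro kk
  simp only [List.mem_filter, List.mem_flatMap, List.mem_map, List.mem_range,
    PySem.Set.mem_ofList, decide_eq_true_eq]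
  constructor
  · rintro ⟨⟨r, hr, c, hc, rfl⟩, hcnt⟩
    exact ⟨List.count_pos_iff.mp (by omega), hcnt⟩
  · rintro ⟨hmem, hcnt⟩
    refine ⟨⟨kk.2.toNat, ?_, kk.1.toNat, ?_, ?_⟩, hcnt⟩
    · have := hP kk hmem; omega
    · have := hP kk hmem; omega
    · have := hP kk hmem
      ext <;> simp <;> omega

-- ===== B-side lemmas =====

-- B's one step of the sweep, phrased through keysOf
def bstep (st : PySem.Set (Int × Int) × PySem.Set (Int × Int))
    (l : (Int × Int) × (Int × Int)) : PySem.Set (Int × Int) × PySem.Set (Int × Int) :=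
  (PySem.Set.union st.1 (PySem.Set.ofList (keysOf l)),
   PySem.Set.union st.2 (PySem.Set.inter st.1 (PySem.Set.ofList (keysOf l))))

lemma B_line_eq (st : PySem.Set (Int × Int) × PySem.Set (Int × Int))
    (l : (Int × Int) × (Int × Int)) :
    (if l.2.1 - l.1.1 == 0 || l.2.2 - l.1.2 == 0 || |l.2.1 - l.1.1| == |l.2.2 - l.1.2| then
       (PySem.Set.union st.1 (PySem.Set.ofList ((PySem.List.pyRange 0 (max |l.2.1 - l.1.1| |l.2.2 - l.1.2| + 1)).map
          (fun i => (l.1.1 + i * pySgn (l.2.1 - l.1.1), l.1.2 + i * pySgn (l.2.2 - l.1.2))))),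
        PySem.Set.union st.2 (PySem.Set.inter st.1 (PySem.Set.ofList ((PySem.List.pyRange 0 (max |l.2.1 - l.1.1| |l.2.2 - l.1.2| + 1)).map
          (fun i => (l.1.1 + i * pySgn (l.2.1 - l.1.1), l.1.2 + i * pySgn (l.2.2 - l.1.2)))))))
     else st)
    = bstep st l := by
  unfold bstep keysOf
  split_ifs
  · rfl
  · have hi : PySem.Set.inter st.1 ([] : List (Int × Int)) = [] := by
      simp [PySem.Set.inter]
    show st = (_, _)
    rw [show PySem.Set.ofList ([] : List (Int × Int)) = [] from rfl, hi]
    rfl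

lemma nodup_keysOf (l : (Int × Int) × (Int × Int)) : (keysOf l).Nodup := by
  unfold keysOf
  split_ifs with hc
  · rw [pyRange_zero_eq _ ((max |l.2.1 - l.1.1| |l.2.2 - l.1.2|).toNat + 1)
      (by have := abs_nonneg (l.2.1 - l.1.1); have := abs_nonneg (l.2.2 - l.1.2); omega),
      List.map_map]
    by_cases h0 : l.2.1 - l.1.1 = 0 ∧ l.2.2 - l.1.2 = 0
    · rw [show (max |l.2.1 - l.1.1| |l.2.2 - l.1.2|).toNat + 1 = 1 by
        rw [h0.1, h0.2]; simp]
      simp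
    · apply List.Nodup.map _ List.nodup_range
      intro a b hab
      simp only [Function.comp_apply, Prod.mk.injEq] at hab
      obtain ⟨h1, h2⟩ := hab
      rcases Decidable.not_and_iff_not_or_not.mp h0 with hdx | hdy
      · have : pySgn (l.2.1 - l.1.1) = 1 ∨ pySgn (l.2.1 - l.1.1) = -1 := by
          unfold pySgn; split_ifs <;> omega
        rcases this with hs | hs <;> rw [hs] at h1 <;>
          [skip; rw [mul_neg_one, mul_neg_one] at h1] <;>
          [rw [mul_one, mul_one] at h1; skip] <;> omega
      · have : pySgn (l.2.2 - l.1.2) = 1 ∨ pySgn (l.2.2 - l.1.2) = -1 := by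
          unfold pySgn; split_ifs <;> omega
        rcases this with hs | hs <;> rw [hs] at h2 <;>
          [skip; rw [mul_neg_one, mul_neg_one] at h2] <;>
          [rw [mul_one, mul_one] at h2; skip] <;> omega
  · exact List.nodup_nil

-- invariant of B's sweep: 'overlaps' is exactly the points counted at least twice so far
lemma b_inv (ls : List ((Int × Int) × (Int × Int)))
    (seen ovl : PySem.Set (Int × Int)) (A : List (Int × Int))
    (hs : seen.Nodup) (ho : ovl.Nodup)
    (hseen : ∀ p, p ∈ seen ↔ p ∈ A)
    (hovl : ∀ p, p ∈ ovl ↔ 1 < A.count p) :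
    (ls.foldl bstep (seen, ovl)).2.Nodup ∧
    ∀ p, p ∈ (ls.foldl bstep (seen, ovl)).2 ↔ 1 < (A ++ ls.flatMap keysOf).count p := by
  induction ls generalizing seen ovl A with
  | nil =>
    refine ⟨ho, fun p => ?_⟩
    rw [List.flatMap_nil, List.append_nil]
    exact hovl p
  | cons l t ih =>
    rw [List.foldl_cons,
      show bstep (seen, ovl) l
        = (PySem.Set.union seen (PySem.Set.ofList (keysOf l)),
           PySem.Set.union ovl (PySem.Set.inter seen (PySem.Set.ofList (keysOf l)))) from rfl]
    have hres := ih (PySem.Set.union seen (PySem.Set.ofList (keysOf l)))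
      (PySem.Set.union ovl (PySem.Set.inter seen (PySem.Set.ofList (keysOf l))))
      (A ++ keysOf l)
      (PySem.Set.nodup_union _ _ hs) (PySem.Set.nodup_union _ _ ho)
      (fun p => by
        rw [PySem.Set.mem_union, PySem.Set.mem_ofList, List.mem_append, hseen])
      (fun p => by
        rw [PySem.Set.mem_union, PySem.Set.mem_inter, PySem.Set.mem_ofList, hovl, hseen,
          List.count_append]
        have hk1 : (keysOf l).count p ≤ 1 := List.nodup_iff_count_le_one.mp (nodup_keysOf l) p
        have hA : p ∈ A ↔ 0 < A.count p := List.count_pos_iff.symm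
        have hK : p ∈ keysOf l ↔ 0 < (keysOf l).count p := List.count_pos_iff.symm
        rw [hA, hK]
        omega)
    refine ⟨hres.1, fun p => ?_⟩
    rw [hres.2 p, List.flatMap_cons, ← List.append_assoc]

-- the size of a nodup list of exactly the >1-count points equals A's final tally
lemma length_eq_countP (R P : List (Int × Int)) (hnd : R.Nodup)
    (hmem : ∀ p, p ∈ R ↔ 1 < P.count p) :
    R.length = (PySem.Set.ofList P).countP (fun kk => decide (1 < P.count kk)) := by
  rw [List.countP_eq_length_filter]
  apply List.Perm.length_eq
  apply (List.perm_ext_iff_of_nodup hnd ((PySem.Set.nodup_ofList P).filter _)).mpr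
  intro p
  rw [hmem p, List.mem_filter, PySem.Set.mem_ofList]
  simp only [decide_eq_true_eq]
  constructor
  · intro h; exact ⟨List.count_pos_iff.mp (by omega), h⟩
  · intro h; exact h.2

-- ===== VERDICT (by name: the statement is the Claim_ definition above) =====
set_option maxRecDepth 4096 in
theorem countOverlappingHorizOrVertOr45DegreeLines_spec : Claim_equal_countOverlappingHorizOrVertOr45DegreeLines := by
  intro lines _ hpre
  unfold Spec_countOverlappingHorizOrVertOr45DegreeLines
  have hQb : ∀ k ∈ lines.flatMap stampsOf, 0 ≤ k.1 ∧ k.1 ≤ 999 ∧ 0 ≤ k.2 ∧ k.2 ≤ 999 := by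
    intro k hk
    obtain ⟨l, hl, hkl⟩ := List.mem_flatMap.mp hk
    exact stampsOf_bounds l (hpre l hl) k hkl
  have hcnt : ∀ k, ((lines.flatMap stampsOf).map wrapPt).count k
      = (lines.flatMap keysOf).count k := by
    intro k
    rw [List.map_flatMap]
    refine count_flatMap_congr lines _ _ (fun a ha k => ?_) k
    rw [map_wrapPt_eq _ (fun k hk => stampsOf_bounds a (hpre a ha) k hk)]
    exact (stampsOf_perm a).count_eq k
  have hPb : ∀ k ∈ lines.flatMap keysOf, 0 ≤ k.1 ∧ k.1 ≤ 999 ∧ 0 ≤ k.2 ∧ k.2 ≤ 999 := by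
    intro k hk
    obtain ⟨l, hl, hkl⟩ := List.mem_flatMap.mp hk
    exact stampsOf_bounds l (hpre l hl) k ((stampsOf_perm l).mem_iff.mpr hkl)
  -- ===== A side =====
  have hA : countOverlappingHorizOrVertOr45DegreeLines lines
      = ((((List.range 1000).map (fun r : Nat =>
          ((List.range 1000).countP (fun c : Nat =>
            decide (1 < (lines.flatMap keysOf).count ((c : Int), (r : Int))))))).sum : Nat) : Int) := by
    unfold countOverlappingHorizOrVertOr45DegreeLines
    dsimp only
    rw [foldl_eq_flatMap_foldl _ stampsOf (fun g k => pyBump g k.2 k.1) A_line_eq]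
    have hgF := foldl_bump_shape (lines.flatMap stampsOf) _ shape_g0
    set gF := (lines.flatMap stampsOf).foldl (fun g k => pyBump g k.2 k.1)
      (((PySem.List.pyRange 0 1000).map (fun _ =>
        ((PySem.List.pyRange 0 1000).map (fun _ => (0 : Int))).toArray)).toArray) with hgFdef
    have hlen : gF.size = 1000 := hgF.1
    have hrow0 : (pyGetA gF 0 #[]).size = 1000 := by
      unfold pyGetA
      rw [if_neg (lt_irrefl 0)]
      have h0 : (0 : Int).toNat = 0 := rfl
      have h0lt : 0 < gF.size := by omega
      rw [h0, (Array.getElem?_eq_some_getElem_iff gF 0 h0lt).mpr trivial, Option.getD_some]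
      exact hgF.2 _ (Array.getElem_mem h0lt)
    rw [hlen, hrow0, pyRange_zero_eq ((1000 : Nat) : Int) 1000 rfl]
    simp only [List.foldl_map]
    simp only [PySem.List.foldl_ite_add_one, PySem.List.foldl_add, zero_add]
    have hcell : ∀ r c : Nat, r < 1000 → c < 1000 →
        pyGetA (pyGetA gF (r : Int) #[]) (c : Int) 0
          = (((lines.flatMap keysOf).count ((c : Int), (r : Int)) : Nat) : Int) := by
      intro r c hr hc
      have hb := foldl_bump_cell (lines.flatMap stampsOf) _ shape_g0
        (fun k hk => by have := hQb k hk; omega) c r hc hr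
      rw [← hgFdef] at hb
      have : pyGetA (pyGetA gF (r : Int) #[]) (c : Int) 0 = cell gF r c := by
        unfold pyGetA cell
        rw [if_neg (not_lt.mpr (Int.natCast_nonneg r)), Int.toNat_natCast,
          if_neg (not_lt.mpr (Int.natCast_nonneg c)), Int.toNat_natCast]
      rw [this, hb, cell_g0, zero_add, hcnt]
    rw [sum_map_natCast, Nat.cast_inj]
    refine congrArg List.sum ?_
    refine List.map_congr_left fun r hr => ?_
    refine List.countP_congr fun c hc => ?_
    rw [hcell r c (List.mem_range.mp hr) (List.mem_range.mp hc)]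
    simp
  -- ===== B side =====
  have hB : countOverlappingHorizOrVertOr45DegreeLines_alt lines
      = (((PySem.Set.ofList (lines.flatMap keysOf)).countP
          (fun kk => decide (1 < (lines.flatMap keysOf).count kk)) : Nat) : Int) := by
    unfold countOverlappingHorizOrVertOr45DegreeLines_alt
    dsimp only
    rw [PySem.List.foldl_congr_mem lines _ bstep _ (fun st l _ => B_line_eq st l)]
    obtain ⟨hnd, hmem⟩ := b_inv lines PySem.Set.empty PySem.Set.empty [] List.nodup_nil
      List.nodup_nil (fun p => by simp [PySem.Set.empty]) (fun p => by simp [PySem.Set.empty])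
    simp only [List.nil_append] at hmem
    rw [show PySem.Set.len (lines.foldl bstep (PySem.Set.empty, PySem.Set.empty)).2
        = (((lines.foldl bstep (PySem.Set.empty, PySem.Set.empty)).2.length : Nat) : Int) from rfl,
      length_eq_countP _ _ hnd hmem]
  rw [hA, hB, final_count _ hPb]
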